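-- pv_equiv track=rewrite | github.com/igorbragaia/algorithms | leetcode/1007.py | solve
-- ===== SOURCE A (Python) =====
-- def solve(top, A, B, maxAns) -> int:
--     count = 0
--     for i in range(len(A)):
--         if A[i] == top:
--             continue
--         elif B[i] == top:
--             count += 1
--         else:
--             return maxAns
--     return count
-- ===== SOURCE B (Python) =====
-- def solve(top, A, B, maxAns) -> int:
--     pairs = list(zip(A, B))
--     if any(a != top and b != top for a, b in pairs):
--         return maxAns
--     return sum(1 for a, b in pairs if a != top and b == top)
-- ===== Notes on version B (the rewrite author's own statement) =====
-- stated objective: idiomatic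
-- what changed: A's single early-return loop with a running counter is replaced by two passes over the zipped (A,B) pairs: a feasibility check with any() and then a separate count with sum(); Pre_ excludes only inputs where A raises IndexError (B too short at an index the loop reaches with A[i] != top).
import Mathlib
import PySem

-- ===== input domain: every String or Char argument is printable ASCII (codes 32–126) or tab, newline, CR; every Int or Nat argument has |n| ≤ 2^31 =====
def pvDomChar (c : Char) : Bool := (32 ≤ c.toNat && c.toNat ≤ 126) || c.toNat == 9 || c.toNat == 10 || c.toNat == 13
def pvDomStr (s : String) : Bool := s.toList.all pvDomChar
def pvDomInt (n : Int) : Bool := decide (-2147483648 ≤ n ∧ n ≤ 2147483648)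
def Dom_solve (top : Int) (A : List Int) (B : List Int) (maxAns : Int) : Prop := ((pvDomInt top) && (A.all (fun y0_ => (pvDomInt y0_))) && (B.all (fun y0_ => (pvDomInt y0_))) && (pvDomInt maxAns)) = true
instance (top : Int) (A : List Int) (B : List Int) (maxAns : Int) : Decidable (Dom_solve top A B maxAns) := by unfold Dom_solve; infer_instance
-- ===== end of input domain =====

-- B replaces A's single early-return counting loop by a feasibility pass (any) over the
-- zipped pairs followed by a separate counting pass (sum); objective: idiomatic, same cost.


-- ===== PORT A =====
-- the for-loop over range(len(A)) with state `count` and early return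
def solveLoop (top : Int) (B : List Int) (maxAns : Int) : List Int → Nat → Int → Int
  | [], _, count => count
  | a :: rest, i, count =>
    if a = top then solveLoop top B maxAns rest (i + 1) count
    else
      match PySem.List.pyGet? B (Int.ofNat i) with
      | some b => if b = top then solveLoop top B maxAns rest (i + 1) (count + 1) else maxAns
      | none => 0  -- Python raises IndexError here; excluded by Pre_solve

def solve (top : Int) (A : List Int) (B : List Int) (maxAns : Int) : Int :=
  solveLoop top B maxAns A 0 0

-- ===== PORT B =====
def solve_alt (top : Int) (A : List Int) (B : List Int) (maxAns : Int) : Int :=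
  let pairs := A.zip B
  if pairs.any (fun p => p.1 != top && p.2 != top) then maxAns
  else (pairs.countP (fun p => p.1 != top && p.2 == top) : Int)

-- ===== PRECONDITION & SPEC =====
-- Pre_solve excludes exactly the inputs on which A raises IndexError: the loop reaches an
-- index i with A[i] ≠ top that is out of range for B without an earlier `return maxAns`.
def Pre_solve (top : Int) (A : List Int) (B : List Int) (maxAns : Int) : Prop :=
  ¬ ∃ i, i < A.length ∧ A.getD i 0 ≠ top ∧ B.length ≤ i ∧
      ∀ j, j < i → (A.getD j 0 = top ∨ (j < B.length ∧ B.getD j 0 = top))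
instance (top : Int) (A : List Int) (B : List Int) (maxAns : Int) : Decidable (Pre_solve top A B maxAns) := by unfold Pre_solve; infer_instance

def pvWitness_solve : Int × List Int × List Int × Int := (1, [1, 2], [2, 1], -1)

def Spec_solve (top : Int) (A : List Int) (B : List Int) (maxAns : Int) (out : Int) : Prop := out = solve_alt top A B maxAns
instance (top : Int) (A : List Int) (B : List Int) (maxAns : Int) (out : Int) : Decidable (Spec_solve top A B maxAns out) := by unfold Spec_solve; infer_instance

-- ===== CLAIM (what is proved, stated in full; the proofs are below) =====
def Claim_equal_solve : Prop := ∀ (top : Int) (A : List Int) (B : List Int) (maxAns : Int), Dom_solve top A B maxAns → Pre_solve top A B maxAns → Spec_solve top A B maxAns (solve top A B maxAns)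

-- ===== LEMMAS AND PROOFS =====

lemma solveLoop_eq (top : Int) (B : List Int) (maxAns : Int) :
    ∀ (A : List Int) (i : Nat) (count : Int),
      (¬ ∃ k, k < A.length ∧ A.getD k 0 ≠ top ∧ B.length ≤ i + k ∧
          ∀ j, j < k → (A.getD j 0 = top ∨ (i + j < B.length ∧ B.getD (i + j) 0 = top))) →
      solveLoop top B maxAns A i count =
        (if (A.zip (B.drop i)).any (fun p => p.1 != top && p.2 != top) then maxAns
         else count + ((A.zip (B.drop i)).countP (fun p => p.1 != top && p.2 == top) : Int)) := by
  intro A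
  induction A with
  | nil => intro i count _; simp [solveLoop]
  | cons a rest ih =>
    intro i count h
    by_cases ha : a = top
    · have hrest : ¬ ∃ k, k < rest.length ∧ rest.getD k 0 ≠ top ∧ B.length ≤ (i + 1) + k ∧
          ∀ j, j < k → (rest.getD j 0 = top ∨ ((i + 1) + j < B.length ∧ B.getD ((i + 1) + j) 0 = top)) := by
        intro ⟨k, hk, hne, hbl, hall⟩
        exact h ⟨k + 1, by simpa using Nat.succ_lt_succ hk, by simpa using hne,
          by omega, by
            intro j hj
            cases j with
            | zero => exact Or.inl (by simpa using ha)
            | succ j' =>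
              have := hall j' (by omega)
              rcases this with h1 | ⟨h2, h3⟩
              · exact Or.inl (by simpa using h1)
              · exact Or.inr ⟨by omega, by
                  have : (i + 1) + j' = i + (j' + 1) := by omega
                  rw [← this]; exact h3⟩⟩
      have step := ih (i + 1) count hrest
      subst ha
      cases hd : B.drop i with
      | nil =>
        have hd1 : B.drop (i + 1) = [] := by
          have : B.drop (i + 1) = (B.drop i).drop 1 := by rw [List.drop_drop]
          simp [this, hd]
        simp [solveLoop, step, hd1]
      | cons b t =>
        have hd1 : B.drop (i + 1) = t := by
          have : B.drop (i + 1) = (B.drop i).drop 1 := by rw [List.drop_drop]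
          simp [this, hd]
        rw [hd1] at step
        simp [solveLoop, step]
        simp only [bne_self_eq_false, Bool.false_and, Bool.false_or]
    · -- a ≠ top: the loop must find i < B.length
      have hib : i < B.length := by
        by_contra hnb
        exact h ⟨0, by simp, by simpa using ha, by omega, by intro j hj; omega⟩
      have hget : PySem.List.pyGet? B (Int.ofNat i) = some B[i] := by
        have := PySem.List.pyGet?_natCast B i
        simpa [List.getElem?_eq_getElem hib] using this
      have hdrop : B.drop i = B[i] :: B.drop (i + 1) := (List.getElem_cons_drop hib).symm
      by_cases hb : B[i] = top
      · have hrest : ¬ ∃ k, k < rest.length ∧ rest.getD k 0 ≠ top ∧ B.length ≤ (i + 1) + k ∧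
            ∀ j, j < k → (rest.getD j 0 = top ∨ ((i + 1) + j < B.length ∧ B.getD ((i + 1) + j) 0 = top)) := by
          intro ⟨k, hk, hne, hbl, hall⟩
          exact h ⟨k + 1, by simpa using Nat.succ_lt_succ hk, by simpa using hne,
            by omega, by
              intro j hj
              cases j with
              | zero =>
                refine Or.inr ⟨by simpa using hib, ?_⟩
                simp [List.getD, List.getElem?_eq_getElem hib, hb]
              | succ j' =>
                have := hall j' (by omega)
                rcases this with h1 | ⟨h2, h3⟩
                · exact Or.inl (by simpa using h1)
                · exact Or.inr ⟨by omega, by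
                    have : (i + 1) + j' = i + (j' + 1) := by omega
                    rw [← this]; exact h3⟩⟩
        have step := ih (i + 1) (count + 1) hrest
        have lhs : solveLoop top B maxAns (a :: rest) i count
            = solveLoop top B maxAns rest (i + 1) (count + 1) := by
          simp [solveLoop, ha, List.getElem?_eq_getElem hib, hb]
        rw [lhs, step, hdrop, List.zip_cons_cons, List.any_cons, List.countP_cons]
        have hp1 : ((a, B[i]).1 != top && (a, B[i]).2 != top) = false := by simp [hb]
        have hp2 : ((a, B[i]).1 != top && (a, B[i]).2 == top) = true := by simp [ha, hb]
        rw [hp1, hp2]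
        simp only [Bool.false_or, if_true]
        split
        · rfl
        · push_cast; ring
      · have lhs : solveLoop top B maxAns (a :: rest) i count = maxAns := by
          simp [solveLoop, ha, List.getElem?_eq_getElem hib, hb]
        have hp : ((a, B[i]).1 != top && (a, B[i]).2 != top) = true := by simp [ha, hb]
        rw [lhs, hdrop, List.zip_cons_cons, List.any_cons, hp]
        simp

theorem solve_spec : Claim_equal_solve := by
  intro top A B maxAns _ hpre
  unfold Spec_solve solve solve_alt
  have h0 : ¬ ∃ k, k < A.length ∧ A.getD k 0 ≠ top ∧ B.length ≤ 0 + k ∧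
      ∀ j, j < k → (A.getD j 0 = top ∨ (0 + j < B.length ∧ B.getD (0 + j) 0 = top)) := by
    intro ⟨k, h1, h2, h3, h4⟩
    exact hpre ⟨k, h1, h2, by omega, by intro j hj; simpa using h4 j hj⟩
  rw [solveLoop_eq top B maxAns A 0 0 h0, List.drop_zero, zero_add]
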